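-- pv_equiv track=rewrite | github.com/NikolaDeja/pp1 | 04-Subroutines/zad36.py | f
-- ===== SOURCE A (Python) =====
-- def f(detector):
--     plus=0
--     for i in detector:
--         if i=="+":
--             plus+=1
--             if plus==3:
--                 return True
--         else:
--             plus-=1
--     return False
-- ===== SOURCE B (Python) =====
-- def f(detector):
--     # Build the full prefix-balance sequence, then test its maximum against 3.
--     # Steps are +/-1 from 0, so the running balance reaches 3 exactly when
--     # some prefix balance is >= 3.
--     sums = []
--     bal = 0
--     for ch in detector:
--         bal = bal + (1 if ch == "+" else -1)
--         sums.append(bal)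
--     return max(sums, default=0) >= 3
-- ===== Notes on version B (the rewrite author's own statement) =====
-- stated objective: alternative
-- what changed: Replaces the early-exit inline counter test (plus==3 inside the loop) by building the whole prefix-balance sequence and then checking max(sums, default=0) >= 3, justified by the +/-1-step lemma that exceeding 3 implies passing through 3.
import Mathlib
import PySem

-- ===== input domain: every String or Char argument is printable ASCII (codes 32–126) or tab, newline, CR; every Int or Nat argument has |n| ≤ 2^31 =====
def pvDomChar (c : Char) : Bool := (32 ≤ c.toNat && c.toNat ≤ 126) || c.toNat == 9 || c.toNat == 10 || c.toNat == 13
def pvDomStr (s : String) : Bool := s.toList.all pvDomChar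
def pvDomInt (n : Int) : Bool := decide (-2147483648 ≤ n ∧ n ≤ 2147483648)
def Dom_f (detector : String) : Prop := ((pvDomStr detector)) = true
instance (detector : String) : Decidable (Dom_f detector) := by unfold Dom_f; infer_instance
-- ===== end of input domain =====

-- B builds the full prefix-balance list and compares its max with 3 instead of
-- A's early-exit inline counter test; same return value on every input (proved below).

-- ===== PORT A =====
-- the loop with its early return: plus counter, +1 on '+', -1 otherwise
def fGo (plus : Int) : List Char → Bool
  | [] => false
  | c :: rest =>
    if c = '+' then
      if plus + 1 = 3 then true else fGo (plus + 1) rest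
    else fGo (plus - 1) rest

def f (detector : String) : Bool := fGo 0 detector.toList

-- ===== PORT B =====
-- the prefix-balance list `sums` built by Source B's loop
def fSums (bal : Int) : List Char → List Int
  | [] => []
  | c :: rest =>
    let b := bal + (if c = '+' then 1 else -1)
    b :: fSums b rest

def f_alt (detector : String) : Bool :=
  let sums := fSums 0 detector.toList
  decide (3 ≤ PySem.List.maxD sums (fun x => x) 0)

-- ===== PRECONDITION & SPEC =====
def Spec_f (detector : String) (out : Bool) : Prop := out = f_alt detector
instance (detector : String) (out : Bool) : Decidable (Spec_f detector out) := by unfold Spec_f; infer_instance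

-- ===== CLAIM (what is proved, stated in full; the proofs are below) =====
def Claim_equal_f : Prop := ∀ (detector : String), Dom_f detector → Spec_f detector (f detector)

-- ===== LEMMAS AND PROOFS =====

-- A's early-exit loop equals "some prefix balance is ≥ 3", provided the start is ≤ 2
theorem fGo_eq_any (l : List Char) : ∀ (plus : Int), plus ≤ 2 →
    fGo plus l = (fSums plus l).any (fun s => decide (3 ≤ s)) := by
  induction l with
  | nil => intro plus _; simp [fGo, fSums]
  | cons c rest ih =>
    intro plus hle
    by_cases hc : c = '+'
    · by_cases h3 : plus + 1 = 3
      · simp [fGo, fSums, hc, h3]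
      · have h2 : plus + 1 ≤ 2 := by
          rcases lt_or_eq_of_le (by omega : plus + 1 ≤ 3) with h | h
          · omega
          · exact absurd h h3
        simp [fGo, fSums, hc, h3, ih _ h2]
        omega
    · have h2 : plus - 1 ≤ 2 := by omega
      simp [fGo, fSums, hc, sub_eq_add_neg, show ¬ (4:Int) ≤ plus by omega]
      rw [show plus + -1 = plus - 1 by ring]
      exact ih _ h2

-- "some element ≥ 3" equals "max (default 0) ≥ 3"
theorem any_eq_maxD (sums : List Int) :
    (sums.any (fun s => decide (3 ≤ s))) = decide (3 ≤ PySem.List.maxD sums (fun x => x) 0) := by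
  cases sums with
  | nil => simp [PySem.List.maxD]; decide
  | cons x t =>
    have hmax : PySem.List.maxD (x :: t) (fun x => x) 0 = t.foldl max x := by
      simp [PySem.List.maxD, PySem.List.max?_id_cons]
    rw [hmax]
    have hub := PySem.List.le_foldl_max t x
    by_cases h : (3 : Int) ≤ t.foldl max x
    · rcases PySem.List.foldl_max_mem t x with hm | hm
      · simp [h, List.any_cons]
        left; omega
      · simp [h, List.any_cons]
        right; exact ⟨_, hm, by omega⟩
    · simp [h, List.any_cons]
      constructor
      · omega
      · intro y hy; have := hub.2 y hy; omega

-- ===== VERDICT (by name: the statement is the Claim_ definition above) =====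
theorem f_spec : Claim_equal_f := by
  intro detector _
  unfold Spec_f f f_alt
  rw [fGo_eq_any _ 0 (by norm_num), any_eq_maxD]
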